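-- pv_equiv track=rewrite | github.com/bobbychansfu/sfu_judge_problems | 1105/submissions/langs.py | find_unique_speakers
-- ===== SOURCE A (Python) =====
-- def find_unique_speakers(french_speakers, spanish_speakers, english_speakers):
--     # Split the strings into sets of names
--     f = french_speakers.split(',')
--     s = spanish_speakers.split(',')
--     e = english_speakers.split(',')
--     # strip out spaces at the end of the lists
--     f = [x.strip() for x in f]
--     s = [x.strip() for x in s]
--     e = [x.strip() for x in e]
--     french = set(f)
--     spanish = set(s)
--     english = set(e)
--
--     # Find students who speak only one language
--     only_one_language = (french - spanish - english) | (spanish - french - english) | (english - french - spanish)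
--
--     # Sort and return the names
--     return sorted(only_one_language)
-- ===== SOURCE B (Python) =====
-- def find_unique_speakers(french_speakers, spanish_speakers, english_speakers):
--     # Count, per name, in how many of the three (deduplicated) language sets
--     # it appears; the names spoken in exactly one language are those with count 1.
--     counts = {}
--     for group in (french_speakers, spanish_speakers, english_speakers):
--         for name in set(x.strip() for x in group.split(',')):
--             counts[name] = counts.get(name, 0) + 1
--     return sorted(name for name, cnt in counts.items() if cnt == 1)
-- ===== Notes on version B (the rewrite author's own statement) =====
-- stated objective: alternative
-- what changed: Replaces the chained set-difference/union expression with a single frequency table: each name's count over the three deduplicated language sets is computed, and names with count exactly 1 are kept and sorted.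
import Mathlib
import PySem

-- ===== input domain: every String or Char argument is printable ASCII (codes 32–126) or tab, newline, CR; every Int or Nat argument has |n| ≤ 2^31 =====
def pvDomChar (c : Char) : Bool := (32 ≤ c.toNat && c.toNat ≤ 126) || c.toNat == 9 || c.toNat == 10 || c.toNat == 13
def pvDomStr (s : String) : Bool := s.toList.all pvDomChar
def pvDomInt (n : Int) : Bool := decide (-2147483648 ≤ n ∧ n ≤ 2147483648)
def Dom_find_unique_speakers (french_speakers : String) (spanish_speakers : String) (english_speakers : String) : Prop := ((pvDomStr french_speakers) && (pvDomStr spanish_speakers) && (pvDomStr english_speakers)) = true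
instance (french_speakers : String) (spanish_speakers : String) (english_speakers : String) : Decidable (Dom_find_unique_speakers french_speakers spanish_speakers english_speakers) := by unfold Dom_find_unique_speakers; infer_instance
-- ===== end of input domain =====

-- B replaces A's chained set-difference/union expression with a count-and-filter
-- pass over one frequency table (count == 1 ⇔ spoken in exactly one language).

-- ===== PORT A =====
def find_unique_speakers (french_speakers : String) (spanish_speakers : String) (english_speakers : String) : List String :=
  -- s.split(','): the separator is the non-empty literal ",", so split? is always some
  let f := (PySem.Str.split? french_speakers ",").getD []
  let s := (PySem.Str.split? spanish_speakers ",").getD []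
  let e := (PySem.Str.split? english_speakers ",").getD []
  let f := f.map PySem.Str.strip
  let s := s.map PySem.Str.strip
  let e := e.map PySem.Str.strip
  let french : PySem.Set String := PySem.Set.ofList f
  let spanish : PySem.Set String := PySem.Set.ofList s
  let english : PySem.Set String := PySem.Set.ofList e
  let only_one_language : PySem.Set String :=
    PySem.Set.union
      (PySem.Set.union (PySem.Set.diff (PySem.Set.diff french spanish) english)
        (PySem.Set.diff (PySem.Set.diff spanish french) english))
      (PySem.Set.diff (PySem.Set.diff english french) spanish)
  -- sorted(set) without a key: the result does not depend on the set's iteration order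
  PySem.List.sorted only_one_language (fun x => x)

-- ===== PORT B =====
-- set(x.strip() for x in group.split(','))
def fusGroupSet (group : String) : PySem.Set String :=
  PySem.Set.ofList (((PySem.Str.split? group ",").getD []).map PySem.Str.strip)

def find_unique_speakers_alt (french_speakers : String) (spanish_speakers : String) (english_speakers : String) : List String :=
  -- the dict is built by iterating sets and read through items, but only the final
  -- sorted() of the filtered keys is returned, which is iteration-order independent
  let counts : PySem.Dict String Int :=
    [french_speakers, spanish_speakers, english_speakers].foldl
      (fun d group =>
        (fusGroupSet group).foldl (fun d name => d.modify name 0 (· + 1)) d)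
      PySem.Dict.empty
  PySem.List.sorted ((counts.items.filter (fun p => p.2 == 1)).map (·.1)) (fun x => x)

-- ===== PRECONDITION & SPEC =====
def Spec_find_unique_speakers (french_speakers : String) (spanish_speakers : String) (english_speakers : String) (out : List String) : Prop := out = find_unique_speakers_alt french_speakers spanish_speakers english_speakers
instance (french_speakers : String) (spanish_speakers : String) (english_speakers : String) (out : List String) : Decidable (Spec_find_unique_speakers french_speakers spanish_speakers english_speakers out) := by unfold Spec_find_unique_speakers; infer_instance

-- ===== CLAIM (what is proved, stated in full; the proofs are below) =====
def Claim_equal_find_unique_speakers : Prop := ∀ (french_speakers : String) (spanish_speakers : String) (english_speakers : String), Dom_find_unique_speakers french_speakers spanish_speakers english_speakers → Spec_find_unique_speakers french_speakers spanish_speakers english_speakers (find_unique_speakers french_speakers spanish_speakers english_speakers)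

-- ===== LEMMAS AND PROOFS =====

-- a Nodup list counts every element 0 or 1 times
theorem fus_count_nodup {x : String} {l : List String} (h : l.Nodup) :
    l.count x = if x ∈ l then 1 else 0 := by
  split_ifs with hm
  · exact List.count_eq_one_of_mem h hm
  · exact List.count_eq_zero_of_not_mem hm

theorem fus_main (fr sp en : String) :
    find_unique_speakers fr sp en = find_unique_speakers_alt fr sp en := by
  unfold find_unique_speakers find_unique_speakers_alt
  simp only [List.foldl, fusGroupSet]
  set F := PySem.Set.ofList (List.map PySem.Str.strip ((PySem.Str.split? fr ",").getD [])) with hF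
  set S := PySem.Set.ofList (List.map PySem.Str.strip ((PySem.Str.split? sp ",").getD [])) with hS
  set E := PySem.Set.ofList (List.map PySem.Str.strip ((PySem.Str.split? en ",").getD [])) with hE
  set counts : PySem.Dict String Int :=
    E.foldl (fun d name => d.modify name 0 (· + 1))
      (S.foldl (fun d name => d.modify name 0 (· + 1))
        (F.foldl (fun d name => d.modify name 0 (· + 1)) PySem.Dict.empty))
    with hcounts
  have hFn : F.Nodup := PySem.Set.nodup_ofList _
  have hSn : S.Nodup := PySem.Set.nodup_ofList _
  have hEn : E.Nodup := PySem.Set.nodup_ofList _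
  -- keys of counts
  have hkeys : counts.keys =
      PySem.Set.update (PySem.Set.update (PySem.Set.update ([] : List String) F) S) E := by
    rw [hcounts, PySem.Dict.keys_foldl_modify _ _ (fun _ _ => (· + 1)),
        PySem.Dict.keys_foldl_modify _ _ (fun _ _ => (· + 1)),
        PySem.Dict.keys_foldl_modify _ _ (fun _ _ => (· + 1)), PySem.Dict.keys_empty]
  have hknd : counts.keys.Nodup := by
    rw [hkeys]
    exact PySem.Set.nodup_update _ _ (PySem.Set.nodup_update _ _ (PySem.Set.nodup_update _ _ List.nodup_nil))
  -- value of counts at any name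
  have hgetD : ∀ x, counts.getD x 0 = (F.count x : Int) + S.count x + E.count x := by
    intro x
    rw [hcounts, PySem.Dict.getD_foldl_modify_add_one, PySem.Dict.getD_foldl_modify_add_one,
        PySem.Dict.getD_foldl_modify_add_one, PySem.Dict.getD_empty]
    ring
  -- the filtered-items list of B is a filter of the (Nodup) key list
  have hitems : counts.items = counts.keys.map (fun k => (k, counts.getD k 0)) :=
    PySem.Dict.items_eq_map_keys counts hknd 0
  have hblist : (counts.items.filter (fun p => p.2 == 1)).map (·.1) =
      counts.keys.filter (fun k => counts.getD k 0 == 1) := by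
    rw [hitems, List.filter_map, List.map_map]
    simp [Function.comp_def]
  rw [hblist]
  -- both sides are sorted(id) of Nodup lists with the same members
  rw [PySem.List.sorted_id_eq_sorted_id_iff_perm]
  rw [List.perm_ext_iff_of_nodup
        (PySem.Set.nodup_union _ _ (PySem.Set.nodup_union _ _ (PySem.Set.nodup_diff _ _ (PySem.Set.nodup_diff _ _ hFn))))
        (hknd.filter _)]
  intro x
  rw [List.mem_filter, PySem.Set.mem_union, PySem.Set.mem_union, PySem.Set.mem_diff,
      PySem.Set.mem_diff, PySem.Set.mem_diff, PySem.Set.mem_diff, PySem.Set.mem_diff,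
      PySem.Set.mem_diff, hkeys, PySem.Set.mem_update, PySem.Set.mem_update, PySem.Set.mem_update,
      hgetD x, fus_count_nodup hFn, fus_count_nodup hSn, fus_count_nodup hEn]
  by_cases hf : x ∈ F <;> by_cases hs : x ∈ S <;> by_cases he : x ∈ E <;>
    simp [hf, hs, he]

-- ===== VERDICT (by name: the statement is the Claim_ definition above) =====
theorem find_unique_speakers_spec : Claim_equal_find_unique_speakers := by
  intro fr sp en _
  exact fus_main fr sp en
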